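-- pv_equiv track=rewrite | github.com/Sanieeme/pythonJan | loop.py | uuid_validator
-- ===== SOURCE A (Python) =====
-- def uuid_validator(list_of_uuids):
--     result = {
--         "valid_uuids": [],
--         "invalid_uuids": []
--     }
--
--     hex_chars = "0123456789abcdef"
--
--     for uuid in list_of_uuids:
--         is_valid = True
--
--         if len(uuid) != 36:
--             is_valid = False
--
--         elif uuid[8] != "-" or uuid[13] != "-" or uuid[18] != "-" or uuid[23] != "-":
--             is_valid = False
--
--         else:
--             for i in range(len(uuid)):
--                 if i in [8, 13, 18, 23]:
--                     continue
--                 if uuid[i].lower() not in hex_chars: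
--                     is_valid = False
--                     break
--
--         if is_valid:
--             result["valid_uuids"].append(uuid)
--         else:
--             result["invalid_uuids"].append(uuid)
--
--     return result
-- ===== SOURCE B (Python) =====
-- def uuid_validator(list_of_uuids):
--     def ok(uuid):
--         parts = uuid.split("-")
--         return [len(p) for p in parts] == [8, 4, 4, 4, 12] and all(
--             c.lower() in "0123456789abcdef" for p in parts for c in p
--         )
--
--     return {
--         "valid_uuids": [u for u in list_of_uuids if ok(u)],
--         "invalid_uuids": [u for u in list_of_uuids if not ok(u)],
--     }
-- ===== Notes on version B (the rewrite author's own statement) =====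
-- stated objective: idiomatic
-- what changed: B validates by splitting on '-' and checking the part lengths are [8,4,4,4,12] with every character a hex digit, and builds the two result lists with two comprehensions, instead of A's index arithmetic (length 36, dash positions, indexed inner loop with a break flag) and in-place appends.
import Mathlib
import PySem

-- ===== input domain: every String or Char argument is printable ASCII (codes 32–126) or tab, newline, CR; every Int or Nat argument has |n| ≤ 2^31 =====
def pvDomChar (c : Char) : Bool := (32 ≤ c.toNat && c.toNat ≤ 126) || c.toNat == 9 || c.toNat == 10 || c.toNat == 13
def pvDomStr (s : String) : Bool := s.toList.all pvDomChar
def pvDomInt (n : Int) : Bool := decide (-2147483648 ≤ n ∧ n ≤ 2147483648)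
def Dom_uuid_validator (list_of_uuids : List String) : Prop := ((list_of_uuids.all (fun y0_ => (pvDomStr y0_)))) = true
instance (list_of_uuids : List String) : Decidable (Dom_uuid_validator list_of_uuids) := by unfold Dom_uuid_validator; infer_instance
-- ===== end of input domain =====

-- B validates UUIDs by splitting on '-' (part lengths [8,4,4,4,12], all hex) and filters the
-- input twice, instead of A's length/dash-position index checks with a flagged inner loop (idiomatic).


-- ===== PORT A =====
-- hex_chars = "0123456789abcdef"; the single-char membership test `uuid[i].lower() in hex_chars`
-- is ported as list membership of the lowered char (exact for a 1-character needle).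
def pvHexChars : List Char :=
  ['0','1','2','3','4','5','6','7','8','9','a','b','c','d','e','f']

-- the inner `for i in range(len(uuid))` with `continue` / `break`
def pvLoopA (cs : List Char) : List Int → Bool
  | [] => true
  | i :: rest =>
    if ([8, 13, 18, 23] : List Int).contains i then pvLoopA cs rest
    else if ¬ pvHexChars.contains (PySem.Chars.lowerChar (PySem.List.pyGetD cs i ' ')) then
      false
    else pvLoopA cs rest

-- per-uuid validity, is_valid flag unfolded into the branch structure of A
def pvCheckA (cs : List Char) : Bool :=
  if cs.length ≠ 36 then false
  else if PySem.List.pyGetD cs 8 ' ' ≠ '-' ∨ PySem.List.pyGetD cs 13 ' ' ≠ '-' ∨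
          PySem.List.pyGetD cs 18 ' ' ≠ '-' ∨ PySem.List.pyGetD cs 23 ' ' ≠ '-' then false
  else pvLoopA cs (PySem.List.pyRange 0 (cs.length : Int) 1)

def uuid_validator (list_of_uuids : List String) : List (String × List String) :=
  let res := list_of_uuids.foldl
    (fun (acc : List String × List String) uuid =>
      if pvCheckA uuid.toList then (acc.1 ++ [uuid], acc.2) else (acc.1, acc.2 ++ [uuid]))
    ([], [])
  [("valid_uuids", res.1), ("invalid_uuids", res.2)]

-- ===== PORT B =====
def pvHexB (c : Char) : Bool :=
  ['0','1','2','3','4','5','6','7','8','9','a','b','c','d','e','f'].contains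
    (PySem.Chars.lowerChar c)

def pvCheckB (cs : List Char) : Bool :=
  let parts := PySem.Chars.splitOn cs ['-']
  (parts.map List.length == [8, 4, 4, 4, 12]) && parts.all (fun p => p.all pvHexB)

def uuid_validator_alt (list_of_uuids : List String) : List (String × List String) :=
  [("valid_uuids", list_of_uuids.filter (fun u => pvCheckB u.toList)),
   ("invalid_uuids", list_of_uuids.filter (fun u => ! pvCheckB u.toList))]

-- ===== PRECONDITION & SPEC =====
def Spec_uuid_validator (list_of_uuids : List String) (out : List (String × List String)) : Prop := out = uuid_validator_alt list_of_uuids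
instance (list_of_uuids : List String) (out : List (String × List String)) : Decidable (Spec_uuid_validator list_of_uuids out) := by unfold Spec_uuid_validator; infer_instance

-- ===== CLAIM (what is proved, stated in full; the proofs are below) =====
def Claim_equal_uuid_validator : Prop := ∀ (list_of_uuids : List String), Dom_uuid_validator list_of_uuids → Spec_uuid_validator list_of_uuids (uuid_validator list_of_uuids)

-- ===== LEMMAS AND PROOFS =====

/-- Reference splitter: split a char list on '-'. -/
def pvSplitDash : List Char → List (List Char)
  | [] => [[]]
  | c :: rest =>
    if c = '-' then [] :: pvSplitDash rest
    else
      match pvSplitDash rest with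
      | [] => [[c]]
      | p :: ps => (c :: p) :: ps

theorem pvSplitDash_ne_nil (cs : List Char) : pvSplitDash cs ≠ [] := by
  induction cs with
  | nil => simp [pvSplitDash]
  | cons c rest ih =>
    simp only [pvSplitDash]
    split
    · simp
    · split <;> simp

def pvConsFst (pre : List Char) : List (List Char) → List (List Char)
  | [] => [pre]
  | p :: ps => (pre ++ p) :: ps

theorem pv_go_eq (l : List Char) : ∀ (fuel : Nat) (cur : List Char) (acc : List (List Char)),
    l.length ≤ fuel →
    PySem.Chars.splitOn.go ['-'] fuel l cur acc =
      acc.reverse ++ pvConsFst cur.reverse (pvSplitDash l) := by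
  induction l with
  | nil =>
    intro fuel cur acc _
    cases fuel <;> simp [PySem.Chars.splitOn.go, pvSplitDash, pvConsFst]
  | cons c rest ih =>
    intro fuel cur acc hf
    cases fuel with
    | zero => simp at hf
    | succ f =>
      simp only [PySem.Chars.splitOn.go]
      by_cases hc : c = '-'
      · subst hc
        have hpre : (['-'] : List Char).isPrefixOf ('-' :: rest) = true := by
          simp [List.isPrefixOf]
        rw [if_pos hpre]
        have := ih f [] (cur.reverse :: acc) (by simpa using Nat.lt_succ_iff.mp (by simpa using hf))
        simp only [List.length_cons] at *
        rw [show List.drop (([] : List Char).length + 1) ('-' :: rest) = rest by simp]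
        rw [this]
        rcases h : pvSplitDash rest with _ | ⟨p, ps⟩
        · exact absurd h (pvSplitDash_ne_nil rest)
        · simp [pvSplitDash, pvConsFst, h]
      · have hpre : (['-'] : List Char).isPrefixOf (c :: rest) = false := by
          simp [List.isPrefixOf]
          exact fun h => absurd h.symm hc
        rw [if_neg (by simp [hpre])]
        have := ih f (c :: cur) acc (by simpa using Nat.lt_succ_iff.mp (by simpa using hf))
        rw [this]
        rcases h : pvSplitDash rest with _ | ⟨p, ps⟩
        · exact absurd h (pvSplitDash_ne_nil rest)
        · simp [pvSplitDash, pvConsFst, h, hc]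


theorem pvSplitOn_dash (cs : List Char) :
    PySem.Chars.splitOn cs ['-'] = pvSplitDash cs := by
  unfold PySem.Chars.splitOn
  rw [pv_go_eq cs (cs.length + 1) [] [] (by omega)]
  rcases h : pvSplitDash cs with _ | ⟨p, ps⟩
  · exact absurd h (pvSplitDash_ne_nil cs)
  · simp [pvConsFst]


theorem pvSplitDash_no_dash (p : List Char) (h : ∀ c ∈ p, c ≠ '-') :
    pvSplitDash p = [p] := by
  induction p with
  | nil => rfl
  | cons c rest ih =>
    have hc : c ≠ '-' := h c (by simp)
    simp only [pvSplitDash, if_neg hc]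
    rw [ih (fun x hx => h x (by simp [hx]))]


theorem pvSplitDash_append (p rest : List Char) (h : ∀ c ∈ p, c ≠ '-') :
    pvSplitDash (p ++ '-' :: rest) = p :: pvSplitDash rest := by
  induction p with
  | nil => simp [pvSplitDash]
  | cons c p ih =>
    have hc : c ≠ '-' := h c (by simp)
    simp only [List.cons_append, pvSplitDash, if_neg hc]
    rw [ih (fun x hx => h x (by simp [hx]))]


/-- Reference joiner, inverse of pvSplitDash. -/
def pvJoinDash : List (List Char) → List Char
  | [] => []
  | [p] => p
  | p :: ps => p ++ '-' :: pvJoinDash ps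

theorem pvJoin_splitDash (cs : List Char) : pvJoinDash (pvSplitDash cs) = cs := by
  induction cs with
  | nil => rfl
  | cons c rest ih =>
    simp only [pvSplitDash]
    by_cases hc : c = '-'
    · subst hc
      rw [if_pos rfl]
      rcases h : pvSplitDash rest with _ | ⟨p, ps⟩
      · exact absurd h (pvSplitDash_ne_nil rest)
      · rw [h] at ih
        simpa [pvJoinDash] using ih
    · rw [if_neg hc]
      rcases h : pvSplitDash rest with _ | ⟨p, ps⟩
      · exact absurd h (pvSplitDash_ne_nil rest)
      · rw [h] at ih
        cases ps <;> simpa [pvJoinDash] using ih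


/-- The common shape both checks recognise. -/
def pvGood (cs : List Char) : Prop :=
  ∃ p1 p2 p3 p4 p5 : List Char,
    cs = p1 ++ '-' :: (p2 ++ '-' :: (p3 ++ '-' :: (p4 ++ '-' :: p5))) ∧
    p1.length = 8 ∧ p2.length = 4 ∧ p3.length = 4 ∧ p4.length = 4 ∧ p5.length = 12 ∧
    p1.all pvHexB ∧ p2.all pvHexB ∧ p3.all pvHexB ∧ p4.all pvHexB ∧ p5.all pvHexB

theorem pvHexB_ne_dash {c : Char} (h : pvHexB c = true) : c ≠ '-' := by
  intro hc
  subst hc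
  exact absurd h (by decide)


theorem pvCheckB_iff (cs : List Char) : pvCheckB cs = true ↔ pvGood cs := by
  unfold pvCheckB
  rw [pvSplitOn_dash]
  constructor
  · intro h
    simp only [Bool.and_eq_true, beq_iff_eq] at h
    obtain ⟨hlen, hall⟩ := h
    rcases hs : pvSplitDash cs with _ | ⟨p1, _ | ⟨p2, _ | ⟨p3, _ | ⟨p4, _ | ⟨p5, _ | ⟨p6, ps⟩⟩⟩⟩⟩⟩ <;>
      rw [hs] at hlen <;> simp at hlen
    obtain ⟨h1, h2, h3, h4, h5⟩ := hlen
    rw [hs] at hall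
    simp only [List.all_cons, List.all_nil, Bool.and_eq_true, Bool.and_true] at hall
    refine ⟨p1, p2, p3, p4, p5, ?_, h1, h2, h3, h4, h5, hall.1, hall.2.1, hall.2.2.1,
      hall.2.2.2.1, hall.2.2.2.2⟩
    have := pvJoin_splitDash cs
    rw [hs] at this
    simpa [pvJoinDash] using this.symm
  · rintro ⟨p1, p2, p3, p4, p5, rfl, h1, h2, h3, h4, h5, a1, a2, a3, a4, a5⟩
    have nd : ∀ (p : List Char), p.all pvHexB = true → ∀ c ∈ p, c ≠ '-' :=
      fun p hp c hc => pvHexB_ne_dash (List.all_eq_true.mp hp c hc)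
    rw [pvSplitDash_append _ _ (nd p1 a1), pvSplitDash_append _ _ (nd p2 a2),
        pvSplitDash_append _ _ (nd p3 a3), pvSplitDash_append _ _ (nd p4 a4),
        pvSplitDash_no_dash _ (nd p5 a5)]
    simp [h1, h2, h3, h4, h5, a1, a2, a3, a4, a5]

theorem pvLoopA_eq_all (cs : List Char) (is : List Int) :
    pvLoopA cs is = is.all (fun i =>
      ([8, 13, 18, 23] : List Int).contains i ||
      pvHexChars.contains (PySem.Chars.lowerChar (PySem.List.pyGetD cs i ' '))) := by
  induction is with
  | nil => rfl
  | cons i rest ih =>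
    simp only [pvLoopA, List.all_cons]
    rcases h1 : ([8, 13, 18, 23] : List Int).contains i
    · rcases h2 : pvHexChars.contains (PySem.Chars.lowerChar (PySem.List.pyGetD cs i ' '))
      · simp
      · simp [ih]
    · simp [ih]


theorem pvCheckA_iff (cs : List Char) : pvCheckA cs = true ↔ pvGood cs := by
  unfold pvCheckA
  rw [pvLoopA_eq_all]
  constructor
  · intro h
    split_ifs at h with hL hD
    push_neg at hL hD
    obtain ⟨d8, d13, d18, d23⟩ := hD
    have hL36 : cs.length = 36 := hL
    have hAll := List.all_eq_true.mp h
    have g : ∀ (j : Nat) (hj : j < 36), cs.getD j ' ' = cs[j]'(by omega) := fun j hj =>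
      List.getD_eq_getElem cs ' ' (by omega)
    rw [PySem.List.pyGetD_ofNat', g 8 (by omega)] at d8
    rw [PySem.List.pyGetD_ofNat', g 13 (by omega)] at d13
    rw [PySem.List.pyGetD_ofNat', g 18 (by omega)] at d18
    rw [PySem.List.pyGetD_ofNat', g 23 (by omega)] at d23
    have hhex : ∀ (j : Nat) (hj : j < 36), j ≠ 8 → j ≠ 13 → j ≠ 18 → j ≠ 23 →
        pvHexB (cs[j]'(by omega)) = true := by
      intro j hj n1 n2 n3 n4
      have hm := hAll (j : Int) (PySem.List.mem_pyRange_one.mpr ⟨by omega, by push_cast; omega⟩)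
      have hcont : ([8, 13, 18, 23] : List Int).contains (j : Int) = false := by
        simp
        omega
      rw [hcont, Bool.false_or, PySem.List.pyGetD_natCast, g j hj] at hm
      exact hm
    refine ⟨cs.take 8, (cs.drop 9).take 4, (cs.drop 14).take 4, (cs.drop 19).take 4,
      cs.drop 24, ?_, ?_, ?_, ?_, ?_, ?_, ?_, ?_, ?_, ?_, ?_⟩
    · have e1 : cs.drop 8 = '-' :: cs.drop 9 := by
        rw [List.drop_eq_getElem_cons (show 8 < cs.length by omega), d8]
      have e2 : cs.drop 13 = '-' :: cs.drop 14 := by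
        rw [List.drop_eq_getElem_cons (show 13 < cs.length by omega), d13]
      have e3 : cs.drop 18 = '-' :: cs.drop 19 := by
        rw [List.drop_eq_getElem_cons (show 18 < cs.length by omega), d18]
      have e4 : cs.drop 23 = '-' :: cs.drop 24 := by
        rw [List.drop_eq_getElem_cons (show 23 < cs.length by omega), d23]
      calc cs = cs.take 8 ++ cs.drop 8 := (List.take_append_drop 8 cs).symm
        _ = cs.take 8 ++ '-' :: ((cs.drop 9).take 4 ++ (cs.drop 9).drop 4) := by
              rw [e1, List.take_append_drop]
        _ = cs.take 8 ++ '-' :: ((cs.drop 9).take 4 ++ '-' :: ((cs.drop 14).take 4 ++ (cs.drop 14).drop 4)) := by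
              rw [List.drop_drop, show (9 + 4 : Nat) = 13 from rfl, e2, List.take_append_drop]
        _ = cs.take 8 ++ '-' :: ((cs.drop 9).take 4 ++ '-' :: ((cs.drop 14).take 4 ++ '-' :: ((cs.drop 19).take 4 ++ (cs.drop 19).drop 4))) := by
              rw [List.drop_drop, show (14 + 4 : Nat) = 18 from rfl, e3, List.take_append_drop]
        _ = cs.take 8 ++ '-' :: ((cs.drop 9).take 4 ++ '-' :: ((cs.drop 14).take 4 ++ '-' :: ((cs.drop 19).take 4 ++ '-' :: cs.drop 24))) := by
              rw [List.drop_drop, show (19 + 4 : Nat) = 23 from rfl, e4]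
    · simp [hL36]
    · simp [hL36]
    · simp [hL36]
    · simp [hL36]
    · simp [hL36]
    · refine List.all_eq_true.mpr ?_
      intro c hc
      obtain ⟨j, hj, rfl⟩ := List.mem_iff_getElem.mp hc
      have hj8 : j < 8 := by simp [hL36] at hj; omega
      rw [List.getElem_take]
      exact hhex j (by omega) (by omega) (by omega) (by omega) (by omega)
    · refine List.all_eq_true.mpr ?_
      intro c hc
      obtain ⟨j, hj, rfl⟩ := List.mem_iff_getElem.mp hc
      have hj4 : j < 4 := by simp [hL36] at hj; omega
      rw [List.getElem_take, List.getElem_drop]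
      exact hhex (9 + j) (by omega) (by omega) (by omega) (by omega) (by omega)
    · refine List.all_eq_true.mpr ?_
      intro c hc
      obtain ⟨j, hj, rfl⟩ := List.mem_iff_getElem.mp hc
      have hj4 : j < 4 := by simp [hL36] at hj; omega
      rw [List.getElem_take, List.getElem_drop]
      exact hhex (14 + j) (by omega) (by omega) (by omega) (by omega) (by omega)
    · refine List.all_eq_true.mpr ?_
      intro c hc
      obtain ⟨j, hj, rfl⟩ := List.mem_iff_getElem.mp hc
      have hj4 : j < 4 := by simp [hL36] at hj; omega
      rw [List.getElem_take, List.getElem_drop]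
      exact hhex (19 + j) (by omega) (by omega) (by omega) (by omega) (by omega)
    · refine List.all_eq_true.mpr ?_
      intro c hc
      obtain ⟨j, hj, rfl⟩ := List.mem_iff_getElem.mp hc
      have hj12 : j < 12 := by simp [hL36] at hj; omega
      rw [List.getElem_drop]
      exact hhex (24 + j) (by omega) (by omega) (by omega) (by omega) (by omega)
  · rintro ⟨p1, p2, p3, p4, p5, rfl, h1, h2, h3, h4, h5, a1, a2, a3, a4, a5⟩
    have hL : (p1 ++ '-' :: (p2 ++ '-' :: (p3 ++ '-' :: (p4 ++ '-' :: p5)))).length = 36 := by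
      simp [h1, h2, h3, h4, h5]
    have g : ∀ (j : Nat) (hj : j < 36),
        (p1 ++ '-' :: (p2 ++ '-' :: (p3 ++ '-' :: (p4 ++ '-' :: p5)))).getD j ' ' =
          (p1 ++ '-' :: (p2 ++ '-' :: (p3 ++ '-' :: (p4 ++ '-' :: p5))))[j]'(by rw [hL]; omega) :=
      fun j hj => List.getD_eq_getElem _ ' ' (by rw [hL]; omega)
    have gidx : ∀ (j : Nat) (hj : j < 36),
        (p1 ++ '-' :: (p2 ++ '-' :: (p3 ++ '-' :: (p4 ++ '-' :: p5))))[j]'(by rw [hL]; omega) =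
          if hx : j < 8 then p1[j]'(by omega)
          else if j = 8 then '-'
          else if hx : j < 13 then p2[j - 9]'(by omega)
          else if j = 13 then '-'
          else if hx : j < 18 then p3[j - 14]'(by omega)
          else if j = 18 then '-'
          else if hx : j < 23 then p4[j - 19]'(by omega)
          else if j = 23 then '-'
          else p5[j - 24]'(by omega) := by
      intro j hj
      by_cases c1 : j < 8
      · simp [List.getElem_append, h1, c1]
      · by_cases c2 : j = 8
        · subst c2
          simp [List.getElem_append, List.getElem_cons, Nat.sub_sub, h1]
        · by_cases c3 : j < 13
          · simp [List.getElem_append, List.getElem_cons, Nat.sub_sub, h1, h2, c1, c2, c3,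
              show ¬ (j - 8 = 0) from by omega, show j - 9 < 4 from by omega]
          · by_cases c4 : j = 13
            · subst c4
              simp [List.getElem_append, List.getElem_cons, Nat.sub_sub, h1, h2]
            · by_cases c5 : j < 18
              · simp [List.getElem_append, List.getElem_cons, Nat.sub_sub, h1, h2, h3, c1, c2, c3, c4, c5,
                  show ¬ (j - 8 = 0) from by omega, show ¬ (j - 9 < 4) from by omega,
                  show ¬ (j - 13 = 0) from by omega, show j - 14 < 4 from by omega]
              · by_cases c6 : j = 18
                · subst c6
                  simp [List.getElem_append, List.getElem_cons, Nat.sub_sub, h1, h2, h3]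
                · by_cases c7 : j < 23
                  · simp [List.getElem_append, List.getElem_cons, Nat.sub_sub, h1, h2, h3, h4, c1, c2, c3, c4, c5, c6, c7,
                      show ¬ (j - 8 = 0) from by omega, show ¬ (j - 9 < 4) from by omega,
                      show ¬ (j - 13 = 0) from by omega, show ¬ (j - 14 < 4) from by omega,
                      show ¬ (j - 18 = 0) from by omega, show j - 19 < 4 from by omega]
                  · by_cases c8 : j = 23
                    · subst c8
                      simp [List.getElem_append, List.getElem_cons, Nat.sub_sub, h1, h2, h3, h4]
                    · simp [List.getElem_append, List.getElem_cons, Nat.sub_sub, h1, h2, h3, h4, h5, c1, c2, c3, c4, c5, c6, c7, c8,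
                        show ¬ (j - 8 = 0) from by omega, show ¬ (j - 9 < 4) from by omega,
                        show ¬ (j - 13 = 0) from by omega, show ¬ (j - 14 < 4) from by omega,
                        show ¬ (j - 18 = 0) from by omega, show ¬ (j - 19 < 4) from by omega,
                        show ¬ (j - 23 = 0) from by omega, show j - 24 < 12 from by omega]
    rw [if_neg (by simp [hL]), if_neg ?side]
    case side =>
      push_neg
      refine ⟨?_, ?_, ?_, ?_⟩
      · rw [PySem.List.pyGetD_ofNat', g 8 (by omega), gidx 8 (by omega)]; simp
      · rw [PySem.List.pyGetD_ofNat', g 13 (by omega), gidx 13 (by omega)]; simp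
      · rw [PySem.List.pyGetD_ofNat', g 18 (by omega), gidx 18 (by omega)]; simp
      · rw [PySem.List.pyGetD_ofNat', g 23 (by omega), gidx 23 (by omega)]; simp
    refine List.all_eq_true.mpr ?_
    intro i hi
    obtain ⟨hi0, hi36⟩ := PySem.List.mem_pyRange_one.mp hi
    rw [hL] at hi36
    by_cases hc : ([8, 13, 18, 23] : List Int).contains i = true
    · rw [hc, Bool.true_or]
    · have hcf : ¬ (i = 8 ∨ i = 13 ∨ i = 18 ∨ i = 23) := by simpa using hc
      push_neg at hcf
      rw [Bool.or_eq_true]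
      right
      rw [PySem.List.pyGetD_eq_getElem _ ' ' hi0 (by rw [hL]; exact_mod_cast hi36)]
      have hj36 : i.toNat < 36 := by omega
      rw [gidx i.toNat hj36]
      have hn8 : i.toNat ≠ 8 := by omega
      have hn13 : i.toNat ≠ 13 := by omega
      have hn18 : i.toNat ≠ 18 := by omega
      have hn23 : i.toNat ≠ 23 := by omega
      have hx : ∀ (p : List Char) (k : Nat) (hk : k < p.length), p.all pvHexB = true →
          pvHexChars.contains (PySem.Chars.lowerChar (p[k]'hk)) = true := by
        intro p k hk hp
        exact List.all_eq_true.mp hp _ (List.getElem_mem hk)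
      by_cases r1 : i.toNat < 8
      · rw [dif_pos r1]; exact hx p1 _ _ a1
      · rw [dif_neg r1, if_neg hn8]
        by_cases r2 : i.toNat < 13
        · rw [dif_pos r2]; exact hx p2 _ _ a2
        · rw [dif_neg r2, if_neg hn13]
          by_cases r3 : i.toNat < 18
          · rw [dif_pos r3]; exact hx p3 _ _ a3
          · rw [dif_neg r3, if_neg hn18]
            by_cases r4 : i.toNat < 23
            · rw [dif_pos r4]; exact hx p4 _ _ a4
            · rw [dif_neg r4, if_neg hn23]; exact hx p5 _ _ a5

theorem pvCheck_eq (cs : List Char) : pvCheckA cs = pvCheckB cs := by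
  rcases hA : pvCheckA cs <;> rcases hB : pvCheckB cs <;> try rfl
  · exact absurd ((pvCheckA_iff cs).2 ((pvCheckB_iff cs).1 hB)) (by simp [hA])
  · exact absurd ((pvCheckB_iff cs).2 ((pvCheckA_iff cs).1 hA)) (by simp [hB])


theorem pvFold_eq_filters (l : List String) (a b : List String) :
    (l.foldl (fun (acc : List String × List String) u =>
        if pvCheckA u.toList then (acc.1 ++ [u], acc.2) else (acc.1, acc.2 ++ [u])) (a, b)) =
      (a ++ l.filter (fun u => pvCheckB u.toList),
       b ++ l.filter (fun u => ! pvCheckB u.toList)) := by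
  induction l generalizing a b with
  | nil => simp
  | cons u rest ih =>
    simp only [List.foldl_cons, List.filter_cons, pvCheck_eq u.toList]
    rcases h : pvCheckB u.toList
    · rw [if_neg (by simp [h]), ih]
      simp [h]
    · rw [if_pos (by simp [h]), ih]
      simp [h]


-- ===== VERDICT (by name: the statement is the Claim_ definition above) =====
theorem uuid_validator_spec : Claim_equal_uuid_validator := by
  intro l _
  unfold Spec_uuid_validator uuid_validator uuid_validator_alt
  rw [pvFold_eq_filters]
  simp
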